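-- pv_equiv track=rewrite | github.com/kakunge/-Study-DeepLearningfromScratch | jwa.py | find
-- ===== SOURCE A (Python) =====
-- def find(l):
--     min = 10**98
--     lp=[]
--     for i in range(len(l)):
--         if min > l[i]:
--             min = l[i]
--             lp.append(min)
--
--     return lp
-- ===== SOURCE B (Python) =====
-- def find(l):
--     # Build the running-minimum table with a sentinel, then keep strict decreases.
--     seq = [10**98]
--     for x in l:
--         seq.append(min(seq[-1], x))
--     return [b for a, b in zip(seq, seq[1:]) if b < a]
-- ===== Notes on version B (the rewrite author's own statement) =====
-- stated objective: alternative
-- what changed: Replaces the inline guard-and-append single pass with a two-phase scheme: first build the running-minimum prefix table (sentinel prepended), then a separate comprehension keeps exactly the strictly decreasing steps.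
import Mathlib
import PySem

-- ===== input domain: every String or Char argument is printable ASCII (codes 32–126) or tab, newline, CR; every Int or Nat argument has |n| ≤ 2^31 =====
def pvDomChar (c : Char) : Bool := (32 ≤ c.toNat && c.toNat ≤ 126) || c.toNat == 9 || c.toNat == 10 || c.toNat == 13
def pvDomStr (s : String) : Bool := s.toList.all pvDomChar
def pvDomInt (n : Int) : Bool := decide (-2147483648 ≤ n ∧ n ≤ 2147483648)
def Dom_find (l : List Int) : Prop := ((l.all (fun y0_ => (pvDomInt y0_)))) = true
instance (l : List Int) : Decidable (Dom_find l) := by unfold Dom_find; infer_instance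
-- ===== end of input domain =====

-- B builds the running-minimum prefix table first, then filters the strict decreases (alternative decomposition, same cost).


-- ===== PORT A =====
-- single pass: keep current min and append each new strict minimum
def find (l : List Int) : List Int :=
  (l.foldl (fun (st : Int × List Int) x =>
    if st.1 > x then (x, st.2 ++ [x]) else st) ((10 : Int)^98, [])).2

-- ===== PORT B =====
-- phase 1: running-minimum table with sentinel head; phase 2: keep strict decreases
def find_alt (l : List Int) : List Int :=
  let seq := l.foldl (fun s x => s ++ [min s.getLast! x]) [(10 : Int)^98]
  (seq.zip seq.tail).filterMap (fun p => if p.2 < p.1 then some p.2 else none)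

-- ===== PRECONDITION & SPEC =====
def Spec_find (l : List Int) (out : List Int) : Prop := out = find_alt l
instance (l : List Int) (out : List Int) : Decidable (Spec_find l out) := by unfold Spec_find; infer_instance

-- ===== CLAIM (what is proved, stated in full; the proofs are below) =====
def Claim_equal_find : Prop := ∀ (l : List Int), Dom_find l → Spec_find l (find l)

-- ===== LEMMAS AND PROOFS =====

-- the common characterisation: the strictly decreasing running minima from m
def runMins (m : Int) : List Int → List Int
  | [] => []
  | x :: xs => if m > x then x :: runMins x xs else runMins m xs

-- the tail of B's running-minimum table
def tailMins (m : Int) : List Int → List Int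
  | [] => []
  | x :: xs => min m x :: tailMins (min m x) xs

theorem findA_loop (l : List Int) : ∀ (m : Int) (acc : List Int),
    (l.foldl (fun (st : Int × List Int) x =>
      if st.1 > x then (x, st.2 ++ [x]) else st) (m, acc)).2 = acc ++ runMins m l := by
  induction l with
  | nil => simp [runMins]
  | cons x xs ih =>
    intro m acc
    simp only [List.foldl_cons, runMins]
    by_cases h : m > x
    · simp [h, ih] 
    · simp [h, ih]

theorem findB_table (l : List Int) : ∀ (s : List Int) (y : Int),
    l.foldl (fun s x => s ++ [min s.getLast! x]) (s ++ [y]) = s ++ y :: tailMins y l := by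
  induction l with
  | nil => intro s y; simp [tailMins]
  | cons x xs ih =>
    intro s y
    simp only [List.foldl_cons, tailMins]
    have hg : (s ++ [y]).getLast! = y := by
      cases s <;> simp [List.getLast!]
    rw [hg, List.append_assoc]
    have := ih (s ++ [y]) (min y x)
    simpa using this

theorem findB_seq (l : List Int) (m : Int) :
    l.foldl (fun s x => s ++ [min s.getLast! x]) [m] = m :: tailMins m l := by
  simpa using findB_table l [] m

theorem findB_filter (l : List Int) : ∀ (m : Int),
    (((m :: tailMins m l).zip (tailMins m l)).filterMap
      (fun p => if p.2 < p.1 then some p.2 else none)) = runMins m l := by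
  induction l with
  | nil => intro m; simp [tailMins, runMins]
  | cons x xs ih =>
    intro m
    simp only [tailMins, runMins, List.zip_cons_cons, List.filterMap_cons]
    by_cases h : m > x
    · have hmin : min m x = x := by omega
      have : (x < m) := h
      simp [hmin, this, ih]
    · have hmin : min m x = m := by omega
      have h' : ¬ (x < m) := h
      simp [hmin, h', ih]

-- ===== VERDICT (by name: the statement is the Claim_ definition above) =====
theorem find_spec : Claim_equal_find := by
  intro l _
  unfold Spec_find find find_alt
  rw [findA_loop, findB_seq]
  simp only [List.tail_cons]
  rw [findB_filter]
  simp
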